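-- pv_equiv track=rewrite | github.com/Mn-Nisar/kianase_matrix | metrix_util.py | getcount_up
-- ===== SOURCE A (Python) =====
-- def getcount_up(exp_c , exp_loc):
--     count_up = 0
--     count_down = 0
--
--     filt_dict = {k:v for (k,v) in exp_c.items() if v == "Up-regulated"}
--     filt_dict_loc = {k:v for (k,v) in exp_loc.items() if v == "Up-regulated"}
--
--     count_up = len(set(filt_dict.keys()) & set(filt_dict_loc.keys()))
--
--
--     filt_dict = {k:v for (k,v) in exp_c.items() if v == "down-regulated"}
--
--     filt_dict_loc = {k:v for (k,v) in exp_loc.items() if v == "down-regulated"}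
--
--     count_down = len(set(filt_dict.keys()) & set(filt_dict_loc.keys()))
--
--
--     return count_up , count_down
-- ===== SOURCE B (Python) =====
-- def getcount_up(exp_c, exp_loc):
--     count_up = 0
--     count_down = 0
--     for k, v in exp_c.items():
--         other = exp_loc.get(k)
--         if v == "Up-regulated" and other == "Up-regulated":
--             count_up += 1
--         elif v == "down-regulated" and other == "down-regulated":
--             count_down += 1
--     return count_up, count_down
-- ===== Notes on version B (the rewrite author's own statement) =====
-- stated objective: simpler
-- what changed: Replaces the four filtered dict comprehensions and two set intersections with a single pass over exp_c that looks each key up in exp_loc and increments one of two counters.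
import Mathlib
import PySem

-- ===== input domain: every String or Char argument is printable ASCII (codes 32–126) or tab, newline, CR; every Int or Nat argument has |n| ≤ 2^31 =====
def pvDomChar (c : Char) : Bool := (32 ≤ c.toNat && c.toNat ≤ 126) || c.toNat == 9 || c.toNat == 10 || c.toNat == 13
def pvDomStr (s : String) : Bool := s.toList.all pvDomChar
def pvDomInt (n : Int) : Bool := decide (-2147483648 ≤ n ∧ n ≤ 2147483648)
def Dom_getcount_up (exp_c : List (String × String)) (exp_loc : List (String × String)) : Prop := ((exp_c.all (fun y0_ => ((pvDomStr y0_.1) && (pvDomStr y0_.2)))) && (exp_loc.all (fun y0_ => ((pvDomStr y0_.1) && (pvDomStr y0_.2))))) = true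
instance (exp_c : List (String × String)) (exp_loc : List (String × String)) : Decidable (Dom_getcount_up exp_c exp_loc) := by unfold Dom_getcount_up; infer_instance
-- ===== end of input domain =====

-- B replaces A's four filtered dict comprehensions and two set intersections by one counting pass
-- over exp_c with a lookup in exp_loc (objective: simpler).

-- ===== PORT A =====
def getcount_up (exp_c : List (String × String)) (exp_loc : List (String × String)) : Int × Int :=
  let count_up : Int := 0
  let count_down : Int := 0
  let filt_dict := exp_c.foldl (fun d p => if p.2 == "Up-regulated" then d.insert p.1 p.2 else d) (PySem.Dict.empty : PySem.Dict String String)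
  let filt_dict_loc := exp_loc.foldl (fun d p => if p.2 == "Up-regulated" then d.insert p.1 p.2 else d) (PySem.Dict.empty : PySem.Dict String String)
  let count_up : Int := (PySem.Set.len (PySem.Set.inter (PySem.Set.ofList filt_dict.keys) (PySem.Set.ofList filt_dict_loc.keys)) : Int)
  let filt_dict := exp_c.foldl (fun d p => if p.2 == "down-regulated" then d.insert p.1 p.2 else d) (PySem.Dict.empty : PySem.Dict String String)
  let filt_dict_loc := exp_loc.foldl (fun d p => if p.2 == "down-regulated" then d.insert p.1 p.2 else d) (PySem.Dict.empty : PySem.Dict String String)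
  let count_down : Int := (PySem.Set.len (PySem.Set.inter (PySem.Set.ofList filt_dict.keys) (PySem.Set.ofList filt_dict_loc.keys)) : Int)
  (count_up, count_down)

-- ===== PORT B =====
def getcount_up_alt (exp_c : List (String × String)) (exp_loc : List (String × String)) : Int × Int :=
  exp_c.foldl (fun acc p =>
    let other := (PySem.Dict.mk exp_loc).get? p.1
    if p.2 == "Up-regulated" && other == some "Up-regulated" then (acc.1 + 1, acc.2)
    else if p.2 == "down-regulated" && other == some "down-regulated" then (acc.1, acc.2 + 1)
    else acc) ((0 : Int), (0 : Int))

-- ===== PRECONDITION & SPEC =====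
-- The association lists stand for Python dicts, whose keys are distinct; Pre_ admits exactly the
-- lists that encode a dict (no duplicate keys — a duplicate-key list is no dict input of A).
def Pre_getcount_up (exp_c : List (String × String)) (exp_loc : List (String × String)) : Prop :=
  (exp_c.map Prod.fst).Nodup ∧ (exp_loc.map Prod.fst).Nodup
instance (exp_c : List (String × String)) (exp_loc : List (String × String)) : Decidable (Pre_getcount_up exp_c exp_loc) := by unfold Pre_getcount_up; infer_instance
def pvWitness_getcount_up : (List (String × String)) × (List (String × String)) :=
  ([("a", "Up-regulated"), ("b", "down-regulated")], [("a", "Up-regulated"), ("b", "x")])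
def Spec_getcount_up (exp_c : List (String × String)) (exp_loc : List (String × String)) (out : Int × Int) : Prop := out = getcount_up_alt exp_c exp_loc
instance (exp_c : List (String × String)) (exp_loc : List (String × String)) (out : Int × Int) : Decidable (Spec_getcount_up exp_c exp_loc out) := by unfold Spec_getcount_up; infer_instance

-- ===== CLAIM (what is proved, stated in full; the proofs are below) =====
def Claim_equal_getcount_up : Prop := ∀ (exp_c : List (String × String)) (exp_loc : List (String × String)), Dom_getcount_up exp_c exp_loc → Pre_getcount_up exp_c exp_loc → Spec_getcount_up exp_c exp_loc (getcount_up exp_c exp_loc)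

-- ===== LEMMAS AND PROOFS =====

-- A's dict comprehension: the conditional insert-fold is the insert-fold of the filtered list.
theorem foldl_insert_filter (v : String) (l : List (String × String)) (d : PySem.Dict String String) :
    l.foldl (fun d p => if p.2 == v then d.insert p.1 p.2 else d) d
      = (l.filter (fun p => p.2 == v)).foldl (fun d p => d.insert p.1 p.2) d := by
  induction l generalizing d with
  | nil => rfl
  | cons p l ih =>
    cases h : (p.2 == v) <;>
      simp only [List.foldl_cons, List.filter_cons, h, if_true, if_false,
        Bool.false_eq_true, ih]

-- keys of the comprehension dict, when the source keys are distinct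
theorem keys_filter_dict (v : String) (l : List (String × String)) (hl : (l.map Prod.fst).Nodup) :
    ((l.foldl (fun d p => if p.2 == v then d.insert p.1 p.2 else d) (PySem.Dict.empty : PySem.Dict String String)).keys)
      = (l.filter (fun p => p.2 == v)).map Prod.fst := by
  rw [foldl_insert_filter]
  have hsub : ((l.filter (fun p => p.2 == v)).map Prod.fst).Sublist (l.map Prod.fst) :=
    (List.filter_sublist (l := l)).map Prod.fst
  have hnd : ((l.filter (fun p => p.2 == v)).map (fun p => p.1)).Nodup := hsub.nodup hl
  have := PySem.Dict.items_foldl_insert_fresh (l := l.filter (fun p => p.2 == v))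
      (k := fun p => p.1) (v := fun p => p.2) (d := (PySem.Dict.empty : PySem.Dict String String))
      (by intro a _; simp [pysem]) hnd
  simp only [PySem.Dict.keys, this]
  simp [PySem.Dict.empty]

-- first-match lookup characterises membership of (k, v) when keys are distinct
theorem get?_mk_eq_some_iff (l : List (String × String)) (hl : (l.map Prod.fst).Nodup) (k v : String) :
    ((PySem.Dict.mk l).get? k = some v) ↔ (k, v) ∈ l := by
  induction l with
  | nil => simp [PySem.Dict.get?]
  | cons p l ih =>
    simp only [List.map_cons, List.nodup_cons] at hl
    rw [PySem.Dict.get?_mk_cons]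
    by_cases hk : p.1 = k
    · subst hk
      simp only [BEq.rfl, if_true, List.mem_cons, Option.some.injEq]
      constructor
      · rintro rfl; left; rfl
      · rintro (h | h)
        · rw [← h]
        · exact absurd h ((by simpa using hl.1 : ∀ x, (p.1, x) ∉ l) v)
    · simp only [beq_iff_eq, hk, if_false, List.mem_cons]
      rw [ih hl.2]
      constructor
      · exact Or.inr
      · rintro (h | h)
        · exact absurd (congrArg Prod.fst h.symm) hk
        · exact h

-- A's per-value count equals a single countP over exp_c
theorem count_A_eq (v : String) (exp_c exp_loc : List (String × String))
    (h1 : (exp_c.map Prod.fst).Nodup) (h2 : (exp_loc.map Prod.fst).Nodup) :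
    PySem.Set.len (PySem.Set.inter
        (PySem.Set.ofList ((exp_c.foldl (fun d p => if p.2 == v then d.insert p.1 p.2 else d) (PySem.Dict.empty : PySem.Dict String String)).keys))
        (PySem.Set.ofList ((exp_loc.foldl (fun d p => if p.2 == v then d.insert p.1 p.2 else d) (PySem.Dict.empty : PySem.Dict String String)).keys)))
      = exp_c.countP (fun p => p.2 == v && ((PySem.Dict.mk exp_loc).get? p.1 == some v)) := by
  rw [keys_filter_dict v exp_c h1, keys_filter_dict v exp_loc h2]
  have hndc : ((exp_c.filter (fun p => p.2 == v)).map Prod.fst).Nodup :=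
    ((List.filter_sublist (l := exp_c)).map Prod.fst).nodup h1
  have hndl : ((exp_loc.filter (fun p => p.2 == v)).map Prod.fst).Nodup :=
    ((List.filter_sublist (l := exp_loc)).map Prod.fst).nodup h2
  rw [show PySem.Set.ofList ((exp_c.filter (fun p => p.2 == v)).map Prod.fst) = (exp_c.filter (fun p => p.2 == v)).map Prod.fst from PySem.Set.ofList_eq_self_of_nodup _ hndc,
      show PySem.Set.ofList ((exp_loc.filter (fun p => p.2 == v)).map Prod.fst) = (exp_loc.filter (fun p => p.2 == v)).map Prod.fst from PySem.Set.ofList_eq_self_of_nodup _ hndl]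
  unfold PySem.Set.inter PySem.Set.len
  rw [← List.countP_eq_length_filter, List.countP_map, List.countP_filter]
  congr 1
  apply List.countP_congr
  intro p _
  have hmem : p.1 ∈ (exp_loc.filter (fun q => q.2 == v)).map Prod.fst ↔
      (PySem.Dict.mk exp_loc).get? p.1 = some v := by
    rw [get?_mk_eq_some_iff exp_loc h2 p.1 v]
    simp only [List.mem_map, List.mem_filter, beq_iff_eq]
    constructor
    · rintro ⟨⟨qk, qv⟩, ⟨hq, hv2⟩, rfl⟩
      cases hv2; exact hq
    · intro hm
      exact ⟨(p.1, v), ⟨hm, rfl⟩, rfl⟩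
  by_cases hv : p.2 = v
  · simp only [Function.comp_apply, hv, BEq.rfl, Bool.and_true, Bool.true_and]
    rw [Bool.eq_iff_iff]
    simp only [PySem.Set.contains_eq_listContains, List.contains_eq_mem, decide_eq_true_eq,
      beq_iff_eq]
    simpa using hmem
  · simp [Function.comp_apply, hv]

-- B's fold with two exclusive tests counts each predicate independently
theorem foldl_two_counters (P1 P2 : String × String → Bool)
    (hdisj : ∀ p, P1 p = true → P2 p = false) :
    ∀ (l : List (String × String)) (a b : Int),
      l.foldl (fun acc p => if P1 p then (acc.1 + 1, acc.2)
          else if P2 p then (acc.1, acc.2 + 1) else acc) (a, b)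
        = (a + l.countP P1, b + l.countP P2) := by
  intro l
  induction l with
  | nil => intro a b; simp
  | cons p l ih =>
    intro a b
    simp only [List.foldl_cons, List.countP_cons]
    by_cases h1 : P1 p = true
    · simp only [h1, hdisj p h1, if_true, Bool.false_eq_true, if_false, ih]; exact Prod.ext (by push_cast; ring) (by push_cast; ring)
    · by_cases h2 : P2 p = true
      · simp only [h1, h2, if_true, Bool.false_eq_true, if_false, ih]; exact Prod.ext (by push_cast; ring) (by push_cast; ring)
      · simp [h1, h2, ih]

-- ===== VERDICT (by name: the statement is the Claim_ definition above) =====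
theorem getcount_up_spec : Claim_equal_getcount_up := by
  intro exp_c exp_loc _ hpre
  obtain ⟨h1, h2⟩ := hpre
  unfold Spec_getcount_up getcount_up getcount_up_alt
  rw [foldl_two_counters
      (fun p => p.2 == "Up-regulated" && ((PySem.Dict.mk exp_loc).get? p.1 == some "Up-regulated"))
      (fun p => p.2 == "down-regulated" && ((PySem.Dict.mk exp_loc).get? p.1 == some "down-regulated"))
      (by intro p h; simp only [Bool.and_eq_true, beq_iff_eq] at h
          simp [h.1])
      exp_c 0 0]
  simp only [count_A_eq "Up-regulated" exp_c exp_loc h1 h2,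
    count_A_eq "down-regulated" exp_c exp_loc h1 h2]
  simp
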